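-- pv_equiv track=rewrite | github.com/Taoge123/OptimizedLeetcode | DailyChallenge/LC_691.py | findNextState
-- ===== SOURCE A (Python) =====
-- def findNextState(state, word, target):
--     n = len(target)
--     for char in word:
--         for k in range(n):
--             # 如果state的第k位是空的, char可以填补上
--             if ((state >> k) & 1) == 0 and target[k] == char:
--                 state += (1 << k)
--                 break
--     return state
-- ===== SOURCE B (Python) =====
-- def findNextState(state, word, target):
--     # Group target positions by character once; keep one advancing cursor per
--     # character, skipping positions whose bit is already set.  Each target
--     # position is passed over at most once, so the whole run is O(n + m)
--     # instead of A's rescan of target for every word character.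
--     pos = {}
--     for k, t in enumerate(target):
--         pos.setdefault(t, []).append(k)
--     cur = {}
--     for char in word:
--         lst = pos.get(char)
--         if lst is None:
--             continue
--         i = cur.get(char, 0)
--         while i < len(lst) and (state >> lst[i]) & 1:
--             i += 1
--         if i < len(lst):
--             state += 1 << lst[i]
--             i += 1
--         cur[char] = i
--     return state
-- ===== Notes on version B (the rewrite author's own statement) =====
-- stated objective: faster
-- what changed: B precomputes a per-character list of target positions and keeps an advancing cursor per character that skips already-set bits, so each target position is visited O(1) times, instead of A's rescan of the whole target for every word character.
import Mathlib
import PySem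

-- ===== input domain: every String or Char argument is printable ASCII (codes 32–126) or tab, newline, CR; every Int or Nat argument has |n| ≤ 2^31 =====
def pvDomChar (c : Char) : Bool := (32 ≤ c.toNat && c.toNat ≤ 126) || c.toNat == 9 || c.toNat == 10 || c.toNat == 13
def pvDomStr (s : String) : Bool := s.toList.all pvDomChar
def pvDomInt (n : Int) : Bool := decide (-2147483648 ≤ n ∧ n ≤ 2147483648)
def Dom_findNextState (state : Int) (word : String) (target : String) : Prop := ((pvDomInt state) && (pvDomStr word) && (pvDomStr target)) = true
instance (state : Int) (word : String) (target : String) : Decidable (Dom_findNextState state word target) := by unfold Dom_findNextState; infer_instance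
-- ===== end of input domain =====

-- B groups target positions by character once and advances one cursor per character,
-- skipping already-set bits, instead of A's rescan of the whole target per word character.

-- ===== PORT A =====
-- inner loop 'for k in range(n): if ((state >> k) & 1) == 0 and target[k] == char: state += (1 << k); break'
-- (scanning target with its running index k; '1 << k' is '1 <<< k', '(state >> k) & 1' is 'PySem.Int.band (state >>> k) 1')
def innerA (state : Int) (char : Char) : Nat → List Char → Int
  | _, [] => state
  | k, t :: rest =>
    if PySem.Int.band (state >>> k) 1 = 0 ∧ t = char then state + (1 <<< k : Nat)
    else innerA state char (k + 1) rest

def findNextState (state : Int) (word : String) (target : String) : Int :=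
  word.toList.foldl (fun s char => innerA s char 0 target.toList) state

-- ===== PORT B =====
-- 'for k, t in enumerate(target): pos.setdefault(t, []).append(k)'
def buildPos : List Char → Nat → PySem.Dict Char (List Nat) → PySem.Dict Char (List Nat)
  | [], _, d => d
  | t :: rest, k, d => buildPos rest (k + 1) (d.modify t [] (· ++ [k]))

-- 'while i < len(lst) and (state >> lst[i]) & 1: i += 1'   (lst[i] is in range under the guard)
def skipIdx (s : Int) (lst : List Nat) (i : Nat) : Nat :=
  if i < lst.length ∧ PySem.Int.band (s >>> lst.getD i 0) 1 ≠ 0 then skipIdx s lst (i + 1) else i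
termination_by lst.length - i
decreasing_by omega

-- one iteration of B's 'for char in word' loop; sc = (state, cursor dict)
def stepB (pos : PySem.Dict Char (List Nat)) (sc : Int × PySem.Dict Char Nat) (char : Char) :
    Int × PySem.Dict Char Nat :=
  match pos.get? char with
  | none => sc
  | some lst =>
    let i := sc.2.getD char 0
    let j := skipIdx sc.1 lst i
    if j < lst.length then (sc.1 + (1 <<< lst.getD j 0 : Nat), sc.2.insert char (j + 1))
    else (sc.1, sc.2.insert char j)

def findNextState_alt (state : Int) (word : String) (target : String) : Int :=
  (word.toList.foldl (stepB (buildPos target.toList 0 PySem.Dict.empty))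
    (state, PySem.Dict.empty)).1

-- ===== PRECONDITION & SPEC =====
def Spec_findNextState (state : Int) (word : String) (target : String) (out : Int) : Prop := out = findNextState_alt state word target
instance (state : Int) (word : String) (target : String) (out : Int) : Decidable (Spec_findNextState state word target out) := by unfold Spec_findNextState; infer_instance

-- ===== CLAIM (what is proved, stated in full; the proofs are below) =====
def Claim_equal_findNextState : Prop := ∀ (state : Int) (word : String) (target : String), Dom_findNextState state word target → Spec_findNextState state word target (findNextState state word target)

-- ===== LEMMAS AND PROOFS =====

-- the bit test both ports perform: '(state >> k) & 1'
def bitOf (s : Int) (k : Nat) : Int := PySem.Int.band (s >>> k) 1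

theorem shiftR_eq (s : Int) (k : Nat) : s >>> k = s / 2 ^ k := by
  rw [Int.shiftRight_eq_div_pow]; norm_cast

theorem castShift (k : Nat) : ((1 <<< k : Nat) : Int) = 2 ^ k := by
  rw [Nat.one_shiftLeft]; push_cast; ring

theorem bitOf_eq (s : Int) (k : Nat) : bitOf s k = (s / 2 ^ k) % 2 := by
  unfold bitOf
  rw [PySem.Int.band_one, PySem.Int.mod_eq_emod_of_pos (by norm_num), shiftR_eq]

-- setting an empty bit k changes exactly bit k
theorem bitOf_add (s : Int) (k : Nat) (h : bitOf s k = 0) (j : Nat) :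
    bitOf (s + (1 <<< k : Nat)) j = if j = k then 1 else bitOf s j := by
  rw [castShift]
  rw [bitOf_eq] at h
  rw [bitOf_eq, bitOf_eq]
  rcases lt_trichotomy j k with hjk | hjk | hjk
  · -- j < k : the quotient shifts by the even number 2^(k-j)
    set e := k - j - 1 with he
    have hk : (2 : Int) ^ k = 2 * 2 ^ e * 2 ^ j := by
      rw [show k = (e + 1) + j by omega, pow_add, pow_succ]
      ring
    rw [hk, Int.add_mul_ediv_right _ _ (by positivity : (2:Int)^j ≠ 0), if_neg (by omega)]
    omega
  · subst hjk
    rw [show s + (2:Int)^j = s + 1 * 2^j by ring,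
      Int.add_mul_ediv_right _ _ (by positivity : (2:Int)^j ≠ 0), if_pos rfl]
    omega
  · -- k < j : the addition stays inside the low j bits
    rw [if_neg (by omega)]
    have hP : (0:Int) < 2 ^ k := by positivity
    have hQ : (0:Int) < 2 ^ j := by positivity
    set e := j - k - 1 with he
    have hdvd : 2 * 2 ^ k ∣ (2:Int) ^ j := by
      refine ⟨2 ^ e, ?_⟩
      rw [show j = (k + 1) + e by omega, pow_add, pow_succ]
      ring
    -- the low k+1 bits of s are below 2^k since bit k is empty
    have hlow : s % (2 * 2 ^ k) < 2 ^ k := by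
      obtain ⟨t, ht⟩ : (2:Int) ∣ s / 2 ^ k := by omega
      have hu := Int.mul_ediv_add_emod s (2 ^ k)
      have hu0 : 0 ≤ s % 2 ^ k := Int.emod_nonneg s (by positivity)
      have hu1 : s % 2 ^ k < 2 ^ k := Int.emod_lt_of_pos s hP
      rw [ht] at hu
      have hs : s = s % 2 ^ k + 2 * 2 ^ k * t := by linarith
      rw [hs, Int.add_mul_emod_self_left, Int.emod_eq_of_lt hu0 (by linarith)]
      exact hu1
    have hrr : s % 2 ^ j % (2 * 2 ^ k) = s % (2 * 2 ^ k) := Int.emod_emod_of_dvd s hdvd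
    obtain ⟨M, hM⟩ := hdvd
    have hM1 : 0 < M := by
      rcases lt_or_ge 0 M with hM0 | hM0
      · exact hM0
      · have : 2 * 2 ^ k * M ≤ 0 := mul_nonpos_of_nonneg_of_nonpos (by positivity) (by omega)
        linarith
    have hr0 : 0 ≤ s % 2 ^ j := Int.emod_nonneg s (by positivity)
    have hr1 : s % 2 ^ j < 2 ^ j := Int.emod_lt_of_pos s hQ
    have hw := Int.mul_ediv_add_emod (s % 2 ^ j) (2 * 2 ^ k)
    set r := s % 2 ^ j with hrdef
    set w := r / (2 * 2 ^ k) with hwdef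
    have hw0 : 0 ≤ w := Int.ediv_nonneg hr0 (by positivity)
    have hwltM : w < M := by
      have h1 : 2 * 2 ^ k * w ≤ r := by
        have := Int.emod_nonneg r (show (2:Int) * 2 ^ k ≠ 0 by positivity)
        linarith
      have h2 : 2 * 2 ^ k * w < 2 * 2 ^ k * M := by rw [← hM]; linarith
      exact lt_of_mul_lt_mul_left h2 (by positivity)
    have hkey : r + 2 ^ k < 2 ^ j := by
      have hu : r % (2 * 2 ^ k) < 2 ^ k := by rw [hrr]; exact hlow
      have h3 : 2 * 2 ^ k * (w + 1) ≤ 2 * 2 ^ k * M :=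
        mul_le_mul_of_nonneg_left (by omega) (by positivity)
      have h4 : r = 2 * 2 ^ k * w + r % (2 * 2 ^ k) := by linarith
      nlinarith
    have hsplit := Int.mul_ediv_add_emod s (2 ^ j)
    have hstep : (s + 2 ^ k) / 2 ^ j = s / 2 ^ j := by
      have he2 : s + 2 ^ k = (r + 2 ^ k) + 2 ^ j * (s / 2 ^ j) := by linarith
      rw [he2, Int.add_mul_ediv_left _ _ (show (2:Int)^j ≠ 0 by positivity),
        Int.ediv_eq_zero_of_lt (by linarith) hkey, zero_add]
    rw [hstep]

-- positions (indices from k on) of char c in the char list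
def posFrom (c : Char) : Nat → List Char → List Nat
  | _, [] => []
  | k, t :: rest => if t = c then k :: posFrom c (k + 1) rest else posFrom c (k + 1) rest

theorem posFrom_mem_ge (c : Char) (l : List Char) :
    ∀ k p, p ∈ posFrom c k l → k ≤ p := by
  induction l with
  | nil => intro k p h; simp [posFrom] at h
  | cons t rest ih =>
    intro k p h
    simp only [posFrom] at h
    by_cases ht : t = c
    · rw [if_pos ht] at h
      rcases List.mem_cons.1 h with rfl | h
      · exact le_rfl
      · exact Nat.le_of_succ_le (ih (k + 1) p h)
    · rw [if_neg ht] at h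
      exact Nat.le_of_succ_le (ih (k + 1) p h)

theorem posFrom_nodup (c : Char) (l : List Char) : ∀ k, (posFrom c k l).Nodup := by
  induction l with
  | nil => intro k; simp [posFrom]
  | cons t rest ih =>
    intro k
    simp only [posFrom]
    by_cases ht : t = c
    · rw [if_pos ht]
      exact List.nodup_cons.2
        ⟨fun h => by have := posFrom_mem_ge c rest (k + 1) k h; omega, ih (k + 1)⟩
    · rw [if_neg ht]
      exact ih (k + 1)

theorem posFrom_disjoint (c c' : Char) (hne : c ≠ c') (l : List Char) :
    ∀ k p, p ∈ posFrom c k l → p ∉ posFrom c' k l := by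
  induction l with
  | nil => intro k p h; simp [posFrom] at h
  | cons t rest ih =>
    intro k p h h'
    simp only [posFrom] at h h'
    by_cases ht : t = c
    · rw [if_pos ht] at h
      rw [if_neg (fun h2 : t = c' => hne (ht.symm.trans h2))] at h'
      rcases List.mem_cons.1 h with rfl | h
      · have := posFrom_mem_ge c' rest (p + 1) p h'; omega
      · exact ih (k + 1) p h h'
    · rw [if_neg ht] at h
      by_cases ht' : t = c'
      · rw [if_pos ht'] at h'
        rcases List.mem_cons.1 h' with rfl | h'
        · have := posFrom_mem_ge c rest (p + 1) p h; omega
        · exact ih (k + 1) p h h'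
      · rw [if_neg ht'] at h'
        exact ih (k + 1) p h h'

theorem posFrom_nil_of_not_mem (c : Char) (l : List Char) :
    ∀ k, c ∉ l → posFrom c k l = [] := by
  induction l with
  | nil => intro k _; rfl
  | cons t rest ih =>
    intro k h
    simp only [List.mem_cons, not_or] at h
    simp only [posFrom, if_neg (fun ht : t = c => h.1 ht.symm)]
    exact ih (k + 1) h.2

-- the first listed position with an empty bit
def firstFree (s : Int) : List Nat → Option Nat
  | [] => none
  | p :: rest => if bitOf s p = 0 then some p else firstFree s rest

theorem innerA_eq (s : Int) (c : Char) (l : List Char) :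
    ∀ k, innerA s c k l = match firstFree s (posFrom c k l) with
      | some p => s + (1 <<< p : Nat)
      | none => s := by
  induction l with
  | nil => intro k; simp [innerA, posFrom, firstFree]
  | cons t rest ih =>
    intro k
    by_cases ht : t = c
    · by_cases hb : bitOf s k = 0
      · rw [show innerA s c k (t :: rest) = s + ((1 <<< k : Nat) : Int) from if_pos ⟨hb, ht⟩]
        simp only [posFrom, if_pos ht, firstFree, if_pos hb]
      · rw [show innerA s c k (t :: rest) = innerA s c (k + 1) rest from
          if_neg (fun hc => hb hc.1)]
        simp only [posFrom, if_pos ht, firstFree, if_neg hb]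
        exact ih (k + 1)
    · rw [show innerA s c k (t :: rest) = innerA s c (k + 1) rest from
        if_neg (fun hc => ht hc.2)]
      simp only [posFrom, if_neg ht]
      exact ih (k + 1)

-- firstFree via an index: everything below j is set, j (if in range) is free
theorem firstFree_of_index (s : Int) (l : List Nat) :
    ∀ j, j ≤ l.length → (∀ m, m < j → bitOf s (l.getD m 0) ≠ 0) →
      (j < l.length → bitOf s (l.getD j 0) = 0) →
      firstFree s l = if j < l.length then some (l.getD j 0) else none := by
  induction l with
  | nil => intro j _ _ _; simp [firstFree]
  | cons p rest ih =>
    intro j hj hset hfree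
    cases j with
    | zero =>
      have hb : bitOf s p = 0 := by simpa using hfree (by simp)
      simp only [firstFree, if_pos hb]
      simp
    | succ j' =>
      have hb : bitOf s p ≠ 0 := by simpa using hset 0 (Nat.succ_pos _)
      simp only [firstFree, if_neg hb]
      rw [ih j' (by simpa using hj)
        (fun m hm => by simpa using hset (m + 1) (by omega))
        (fun h => by simpa using hfree (by simpa using h))]
      simp only [List.length_cons]
      by_cases h : j' < rest.length
      · rw [if_pos h, if_pos (by omega)]
        simp
      · rw [if_neg h, if_neg (by omega)]

theorem skipIdx_props (s : Int) (lst : List Nat) :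
    ∀ (fuel i : Nat), lst.length ≤ i + fuel → i ≤ lst.length →
      i ≤ skipIdx s lst i ∧ skipIdx s lst i ≤ lst.length ∧
        (∀ m, i ≤ m → m < skipIdx s lst i → bitOf s (lst.getD m 0) ≠ 0) ∧
        (skipIdx s lst i < lst.length → bitOf s (lst.getD (skipIdx s lst i) 0) = 0) := by
  intro fuel
  induction fuel with
  | zero =>
    intro i h1 h2
    rw [skipIdx, if_neg (fun hc => absurd hc.1 (by omega))]
    exact ⟨le_rfl, h2, fun m hm1 hm2 => by omega, fun hlt => absurd hlt (by omega)⟩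
  | succ fuel ih =>
    intro i h1 h2
    rw [skipIdx]
    by_cases hcond : i < lst.length ∧ PySem.Int.band (s >>> lst.getD i 0) 1 ≠ 0
    · rw [if_pos hcond]
      obtain ⟨ih1, ih2, ih3, ih4⟩ := ih (i + 1) (by omega) (by omega)
      refine ⟨by omega, ih2, ?_, ih4⟩
      intro m hm1 hm2
      rcases Nat.eq_or_lt_of_le hm1 with rfl | hlt
      · exact hcond.2
      · exact ih3 m hlt hm2
    · rw [if_neg hcond]
      rw [not_and_or] at hcond
      refine ⟨le_rfl, h2, fun m hm1 hm2 => by omega, ?_⟩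
      intro hlt
      rcases hcond with hcond | hcond
      · omega
      · simpa [bitOf] using hcond

-- getD-membership bridges
theorem getD_mem (l : List Nat) (m : Nat) (hm : m < l.length) : l.getD m 0 ∈ l := by
  rw [List.getD_eq_getElem l 0 hm]
  exact List.getElem_mem hm

theorem nodup_getD_ne (l : List Nat) (hnd : l.Nodup) (m j : Nat) (hm : m < l.length)
    (hj : j < l.length) (hne : m ≠ j) : l.getD m 0 ≠ l.getD j 0 := by
  rw [List.getD_eq_getElem l 0 hm, List.getD_eq_getElem l 0 hj]
  intro h
  exact hne ((List.Nodup.getElem_inj_iff hnd).1 h)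

-- get? after modify (derived from the PySem getD/contains lemmas)
theorem get?_modify_self' (d : PySem.Dict Char (List Nat)) (t : Char)
    (f : List Nat → List Nat) : (d.modify t [] f).get? t = some (f (d.getD t [])) := by
  have hc : (d.modify t [] f).contains t = true := by
    rw [PySem.Dict.contains_modify]; simp
  cases hg : (d.modify t [] f).get? t with
  | none =>
    have := (PySem.Dict.get?_eq_none_iff_contains _ _).1 hg
    rw [this] at hc
    exact Bool.noConfusion hc
  | some v =>
    have h1 := PySem.Dict.getD_of_get?_eq_some (d.modify t [] f) ([] : List Nat) hg
    rw [PySem.Dict.getD_modify_self] at h1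
    rw [h1]

theorem get?_modify_of_ne' (d : PySem.Dict Char (List Nat)) (t c : Char) (h : c ≠ t)
    (f : List Nat → List Nat) : (d.modify t [] f).get? c = d.get? c := by
  cases hg : d.get? c with
  | none =>
    have hcf : d.contains c = false := (PySem.Dict.get?_eq_none_iff_contains d c).1 hg
    have : (d.modify t [] f).contains c = false := by
      rw [PySem.Dict.contains_modify, hcf]
      simp [h]
    exact (PySem.Dict.get?_eq_none_iff_contains _ _).2 this
  | some v =>
    have h2 : (d.modify t [] f).getD c [] = v := by
      rw [PySem.Dict.getD_modify_of_ne d ([] : List Nat) f h]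
      exact PySem.Dict.getD_of_get?_eq_some d ([] : List Nat) hg
    cases hg2 : (d.modify t [] f).get? c with
    | none =>
      have hcf := (PySem.Dict.get?_eq_none_iff_contains _ _).1 hg2
      have hct : d.contains c = true := by
        rw [PySem.Dict.contains_eq_isSome_get?, hg]; rfl
      rw [PySem.Dict.contains_modify, hct] at hcf
      simp at hcf
    | some w =>
      have h3 := PySem.Dict.getD_of_get?_eq_some (d.modify t [] f) ([] : List Nat) hg2
      rw [h2] at h3
      rw [h3]

theorem build_get? (l : List Char) :
    ∀ (k : Nat) (d : PySem.Dict Char (List Nat)) (c : Char),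
      (buildPos l k d).get? c =
        if c ∈ l then some ((d.get? c).getD [] ++ posFrom c k l) else d.get? c := by
  induction l with
  | nil => intro k d c; simp [buildPos]
  | cons t rest ih =>
    intro k d c
    simp only [buildPos]
    rw [ih]
    by_cases hct : c = t
    · subst hct
      rw [get?_modify_self']
      by_cases hcr : c ∈ rest
      · rw [if_pos hcr, if_pos List.mem_cons_self]
        simp [posFrom, PySem.Dict.getD_eq_get?_getD]
      · rw [if_neg hcr, if_pos List.mem_cons_self]
        simp only [posFrom]
        rw [posFrom_nil_of_not_mem c rest (k + 1) hcr]
        simp [PySem.Dict.getD_eq_get?_getD]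
    · rw [get?_modify_of_ne' d t c hct]
      by_cases hcr : c ∈ rest
      · rw [if_pos hcr, if_pos (List.mem_cons_of_mem _ hcr)]
        simp [posFrom, if_neg (fun h : t = c => hct h.symm)]
      · rw [if_neg hcr, if_neg (by simp [hcr, fun h : c = t => hct h])]

theorem pos_get? (tgt : List Char) (c : Char) :
    (buildPos tgt 0 PySem.Dict.empty).get? c =
      if c ∈ tgt then some (posFrom c 0 tgt) else none := by
  rw [build_get?]
  by_cases hc : c ∈ tgt
  · rw [if_pos hc, if_pos hc]
    simp [PySem.Dict.get?_empty]
  · rw [if_neg hc, if_neg hc]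
    simp [PySem.Dict.get?_empty]

-- cursor invariant: each cursor is in range and every position before it is set
def InvC (s : Int) (tgt : List Char) (cur : PySem.Dict Char Nat) : Prop :=
  ∀ c, cur.getD c 0 ≤ (posFrom c 0 tgt).length ∧
    ∀ m, m < cur.getD c 0 → bitOf s ((posFrom c 0 tgt).getD m 0) ≠ 0

theorem stepB_agrees (tgt : List Char) (s : Int) (cur : PySem.Dict Char Nat) (c : Char)
    (h : InvC s tgt cur) :
    (stepB (buildPos tgt 0 PySem.Dict.empty) (s, cur) c).1 = innerA s c 0 tgt ∧
      InvC (stepB (buildPos tgt 0 PySem.Dict.empty) (s, cur) c).1 tgt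
        (stepB (buildPos tgt 0 PySem.Dict.empty) (s, cur) c).2 := by
  rw [innerA_eq]
  unfold stepB
  rw [pos_get? tgt c]
  by_cases hc : c ∈ tgt
  case neg =>
    rw [if_neg hc, posFrom_nil_of_not_mem c tgt 0 hc]
    exact ⟨rfl, h⟩
  case pos =>
    rw [if_pos hc]
    simp only
    set l := posFrom c 0 tgt with hl
    obtain ⟨hi, hset⟩ := h c
    set i := cur.getD c 0 with hidef
    obtain ⟨hj1, hj2, hj3, hj4⟩ := skipIdx_props s l l.length i (by omega) hi
    set j := skipIdx s l i with hjdef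
    have hallset : ∀ m, m < j → bitOf s (l.getD m 0) ≠ 0 := by
      intro m hm
      by_cases hmi : m < i
      · exact hset m hmi
      · exact hj3 m (by omega) hm
    have hff : firstFree s l = if j < l.length then some (l.getD j 0) else none :=
      firstFree_of_index s l j hj2 hallset hj4
    rw [hff]
    by_cases hlt : j < l.length
    case pos =>
      rw [if_pos hlt, if_pos hlt]
      set p := l.getD j 0 with hpdef
      have hfree : bitOf s p = 0 := hj4 hlt
      have hbits := bitOf_add s p hfree
      refine ⟨rfl, ?_⟩
      intro c'
      rw [PySem.Dict.getD_insert]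
      by_cases hcc : c' = c
      · rw [if_pos hcc]
        subst hcc
        rw [← hl]
        refine ⟨by omega, ?_⟩
        intro m hm
        rcases Nat.lt_succ_iff_lt_or_eq.1 hm with hm | rfl
        · rw [hbits, if_neg (fun heq => nodup_getD_ne l (by rw [hl]; exact posFrom_nodup c' tgt 0)
            m j (by omega) hlt (by omega) heq)]
          exact hallset m hm
        · rw [hbits, if_pos rfl]
          decide
      · rw [if_neg hcc]
        obtain ⟨hi', hset'⟩ := h c'
        refine ⟨hi', ?_⟩
        intro m hm
        have hx : (posFrom c' 0 tgt).getD m 0 ∈ posFrom c' 0 tgt :=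
          getD_mem _ m (by omega)
        have hp : p ∈ posFrom c 0 tgt := hl ▸ getD_mem l j hlt
        rw [hbits, if_neg (fun heq : (posFrom c' 0 tgt).getD m 0 = p =>
          posFrom_disjoint c c' (fun hcc' => hcc hcc'.symm) tgt 0 p hp (heq ▸ hx))]
        exact hset' m hm
    case neg =>
      rw [if_neg hlt, if_neg hlt]
      refine ⟨rfl, ?_⟩
      intro c'
      rw [PySem.Dict.getD_insert]
      by_cases hcc : c' = c
      · rw [if_pos hcc]
        subst hcc
        rw [← hl]
        exact ⟨hj2, hallset⟩
      · rw [if_neg hcc]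
        exact h c'

theorem foldl_agrees (ws : List Char) (tgt : List Char) :
    ∀ (s : Int) (cur : PySem.Dict Char Nat), InvC s tgt cur →
      (ws.foldl (stepB (buildPos tgt 0 PySem.Dict.empty)) (s, cur)).1 =
        ws.foldl (fun s c => innerA s c 0 tgt) s := by
  induction ws with
  | nil => intro s cur _; rfl
  | cons c rest ih =>
    intro s cur h
    obtain ⟨h1, h2⟩ := stepB_agrees tgt s cur c h
    simp only [List.foldl_cons]
    cases hsb : stepB (buildPos tgt 0 PySem.Dict.empty) (s, cur) c with
    | mk s' cur' =>
      rw [hsb] at h1 h2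
      simp only at h1 h2
      rw [← h1]
      exact ih s' cur' h2

theorem invC_init (s : Int) (tgt : List Char) : InvC s tgt PySem.Dict.empty := by
  intro c
  rw [PySem.Dict.getD_empty]
  exact ⟨Nat.zero_le _, fun m hm => by omega⟩

-- ===== VERDICT (by name: the statement is the Claim_ definition above) =====
theorem findNextState_spec : Claim_equal_findNextState := by
  intro state word target _
  unfold Spec_findNextState findNextState findNextState_alt
  rw [foldl_agrees word.toList target.toList state _ (invC_init state target.toList)]
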